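-- pv_equiv track=rewrite | github.com/Ancestorum/fatal3k | plugins/turn/turn.py | fix_en_to_ru_layout
-- ===== SOURCE A (Python) =====
-- def fix_en_to_ru_layout(text):
--     # Создаем словарь для замены символов
--     replacements = {
--         'q': 'й', 'w': 'ц', 'e': 'у', 'r': 'к', 't': 'е', 'y': 'н',
--         'u': 'г', 'i': 'ш', 'o': 'щ', 'p': 'з', 'a': 'ф', 's': 'ы',
--         'd': 'в', 'f': 'а', 'g': 'п', 'h': 'р', 'j': 'о', 'k': 'л',
--         'l': 'д', 'z': 'я', 'x': 'ч', 'c': 'с', 'v': 'м', 'b': 'и',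
--         'n': 'т', 'm': 'ь', '[': 'х', ']': 'ъ', ';': 'ж', '\'': 'э',
--         ',': 'б', '.': 'ю', '/': '.', '\\': '/', '~': 'Ё', '{': 'Х',
--         '+': 'Ё', ':': 'Ж', '"': 'Э', '<': 'Б', '>': 'Ю', '?': ',',
--         '&': '?'
--     }
--
--     # Проходимся по каждому символу строки и заменяем его согласно словарю
--     fixed_text = []
--     for char in text:
--         if char.lower() in replacements:
--             replacement_char = replacements.get(char.lower())
--             if char.isupper():
--                 replacement_char = replacement_char.upper()
--             fixed_text.append(replacement_char)
--         else:
--             fixed_text.append(char)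
--
--     return ''.join(fixed_text)
-- ===== SOURCE B (Python) =====
-- # Translation table built once from three parallel source/destination strings
-- # (lowercase letters, uppercase letters, symbols); text.translate does one
-- # uniform pass with no per-character case logic.
-- _TABLE = str.maketrans(
--     "qwertyuiopasdfghjklzxcvbnm"
--     "QWERTYUIOPASDFGHJKLZXCVBNM"
--     "[];',./\\~{+:\"<>?&",
--     "йцукенгшщзфывапролдячсмить"
--     "ЙЦУКЕНГШЩЗФЫВАПРОЛДЯЧСМИТЬ"
--     "хъжэбю./ЁХЁЖЭБЮ,?")
--
-- def fix_en_to_ru_layout(text):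
--     return text.translate(_TABLE)
-- ===== Notes on version B (the rewrite author's own statement) =====
-- stated objective: faster
-- what changed: B replaces A's per-character Python loop with lower()/isupper()/upper() branching and a dict lookup by a single str.maketrans table built from three parallel literal source/destination strings (lowercase, uppercase, symbols) and one text.translate pass in C.
import Mathlib
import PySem

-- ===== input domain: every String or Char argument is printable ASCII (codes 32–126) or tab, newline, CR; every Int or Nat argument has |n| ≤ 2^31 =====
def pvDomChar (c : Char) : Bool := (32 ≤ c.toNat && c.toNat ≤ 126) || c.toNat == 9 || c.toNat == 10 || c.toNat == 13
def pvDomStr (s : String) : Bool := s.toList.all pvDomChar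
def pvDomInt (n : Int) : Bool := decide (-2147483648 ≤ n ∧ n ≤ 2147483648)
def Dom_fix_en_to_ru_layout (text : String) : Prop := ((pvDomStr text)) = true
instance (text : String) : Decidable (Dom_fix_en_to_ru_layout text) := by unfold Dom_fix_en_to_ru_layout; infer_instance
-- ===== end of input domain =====

-- B builds one str.maketrans table from three parallel literal strings (lowercase, uppercase,
-- symbols) and translates in a single uniform pass; A branches on lower/isupper per character.

-- hand port of Python's single-char str.upper() used by A: exact on ASCII and on the
-- Cyrillic letters а..я / ё that occur as replacement values here (upper = codepoint - 0x20)
def pyUpperChar (c : Char) : Char :=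
  if 'a' ≤ c ∧ c ≤ 'z' then Char.ofNat (c.toNat - 32)
  else if 'а' ≤ c ∧ c ≤ 'я' then Char.ofNat (c.toNat - 32)
  else if c = 'ё' then 'Ё'
  else c

-- ===== PORT A =====
def replacementsA : PySem.Dict Char Char := PySem.Dict.ofList
  [('q','й'), ('w','ц'), ('e','у'), ('r','к'), ('t','е'), ('y','н'),
   ('u','г'), ('i','ш'), ('o','щ'), ('p','з'), ('a','ф'), ('s','ы'),
   ('d','в'), ('f','а'), ('g','п'), ('h','р'), ('j','о'), ('k','л'),
   ('l','д'), ('z','я'), ('x','ч'), ('c','с'), ('v','м'), ('b','и'),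
   ('n','т'), ('m','ь'), ('[','х'), (']','ъ'), (';','ж'), ('\'','э'),
   (',','б'), ('.','ю'), ('/','.'), ('\\','/'), ('~','Ё'), ('{','Х'),
   ('+','Ё'), (':','Ж'), ('"','Э'), ('<','Б'), ('>','Ю'), ('?',','),
   ('&','?')]

def fix_en_to_ru_layout (text : String) : String :=
  String.mk (text.toList.foldl (fun fixed_text char =>
    if replacementsA.contains (PySem.Chars.lowerChar char) then
      let replacement_char := (replacementsA.get? (PySem.Chars.lowerChar char)).getD char
      let replacement_char :=
        if PySem.Chars.isupper char then pyUpperChar replacement_char else replacement_char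
      fixed_text ++ [replacement_char]
    else
      fixed_text ++ [char]) [])

-- ===== PORT B =====
-- str.maketrans(src, dst): pair up the characters of the two parallel strings
def tableB : List (Char × Char) :=
  (("qwertyuiopasdfghjklzxcvbnm" ++ "QWERTYUIOPASDFGHJKLZXCVBNM" ++ "[];',./\\~{+:\"<>?&").toList).zip
  (("йцукенгшщзфывапролдячсмить" ++ "ЙЦУКЕНГШЩЗФЫВАПРОЛДЯЧСМИТЬ" ++ "хъжэбю./ЁХЁЖЭБЮ,?").toList)

-- str.translate: one uniform lookup per character, identity when the char has no entry
def fix_en_to_ru_layout_alt (text : String) : String :=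
  String.mk (text.toList.map (fun c =>
    ((tableB.find? (fun p => p.1 == c)).map Prod.snd).getD c))

-- ===== PRECONDITION & SPEC =====
def Spec_fix_en_to_ru_layout (text : String) (out : String) : Prop := out = fix_en_to_ru_layout_alt text
instance (text : String) (out : String) : Decidable (Spec_fix_en_to_ru_layout text out) := by unfold Spec_fix_en_to_ru_layout; infer_instance

-- ===== CLAIM (what is proved, stated in full; the proofs are below) =====
def Claim_equal_fix_en_to_ru_layout : Prop := ∀ (text : String), Dom_fix_en_to_ru_layout text → Spec_fix_en_to_ru_layout text (fix_en_to_ru_layout text)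

-- ===== LEMMAS AND PROOFS =====

-- A's per-character step
def stepA (c : Char) : Char :=
  if replacementsA.contains (PySem.Chars.lowerChar c) then
    let r := (replacementsA.get? (PySem.Chars.lowerChar c)).getD c
    if PySem.Chars.isupper c then pyUpperChar r else r
  else c

-- B's per-character step
def stepB (c : Char) : Char :=
  ((tableB.find? (fun p => p.1 == c)).map Prod.snd).getD c

theorem foldA_eq_map (l : List Char) (acc : List Char) :
    l.foldl (fun fixed_text char =>
      if replacementsA.contains (PySem.Chars.lowerChar char) then
        let replacement_char := (replacementsA.get? (PySem.Chars.lowerChar char)).getD char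
        let replacement_char :=
          if PySem.Chars.isupper char then pyUpperChar replacement_char else replacement_char
        fixed_text ++ [replacement_char]
      else
        fixed_text ++ [char]) acc = acc ++ l.map stepA := by
  induction l generalizing acc with
  | nil => simp
  | cons c t ih =>
    simp only [List.foldl_cons, List.map_cons, ih, stepA]
    split_ifs <;> simp

set_option maxRecDepth 40000 in
theorem step_agree : ∀ n : Fin 128, stepA (Char.ofNat n.val) = stepB (Char.ofNat n.val) := by decide

set_option maxRecDepth 40000 in
theorem step_agree' (c : Char) (h : pvDomChar c = true) : stepA c = stepB c := by
  have h128 : c.toNat < 128 := by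
    unfold pvDomChar at h
    simp only [Bool.or_eq_true, Bool.and_eq_true, decide_eq_true_eq, beq_iff_eq] at h
    omega
  have := step_agree ⟨c.toNat, h128⟩
  simpa [Char.ofNat_toNat] using this

-- ===== VERDICT (by name: the statement is the Claim_ definition above) =====
set_option maxRecDepth 40000 in
theorem fix_en_to_ru_layout_spec : Claim_equal_fix_en_to_ru_layout := by
  intro text hdom
  unfold Spec_fix_en_to_ru_layout fix_en_to_ru_layout fix_en_to_ru_layout_alt
  rw [foldA_eq_map]
  simp only [List.nil_append]
  congr 1
  apply List.map_congr_left
  intro c hc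
  exact step_agree' c (by
    unfold Dom_fix_en_to_ru_layout pvDomStr at hdom
    exact List.all_eq_true.mp hdom c hc)
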